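-- pv_equiv track=rewrite | github.com/GAIA-UNIL/G2S | build/qs_decentralized.py | parse_arg_entries
-- ===== SOURCE A (Python) =====
-- from typing import Any, Dict, List, Optional, Sequence, Set, Tuple
--
-- def parse_arg_entries(argv: Sequence[str]) -> List[Tuple[str, List[str]]]:
--     entries: List[Tuple[str, List[str]]] = []
--     i = 1
--     while i < len(argv):
--         token = argv[i]
--         if not token.startswith("-"):
--             i += 1
--             continue
--         key = token
--         i += 1
--         values: List[str] = []
--         while i < len(argv) and not argv[i].startswith("-"):
--             values.append(argv[i])
--             i += 1
--         entries.append((key, values))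
--     return entries
-- ===== SOURCE B (Python) =====
-- def parse_arg_entries(argv):
--     n = len(argv)
--     positions = [i for i, tok in enumerate(argv) if i >= 1 and tok.startswith("-")]
--     entries = []
--     for pos, nxt in zip(positions, positions[1:] + [n]):
--         entries.append((argv[pos], list(argv[pos + 1:nxt])))
--     return entries
-- ===== Notes on version B (the rewrite author's own statement) =====
-- stated objective: alternative
-- what changed: Replaces A's nested while loops over a moving cursor with two phases: first collect all flag positions (index >= 1, token starts with '-'), then slice argv between consecutive flag positions to get each flag's values.
import Mathlib
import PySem

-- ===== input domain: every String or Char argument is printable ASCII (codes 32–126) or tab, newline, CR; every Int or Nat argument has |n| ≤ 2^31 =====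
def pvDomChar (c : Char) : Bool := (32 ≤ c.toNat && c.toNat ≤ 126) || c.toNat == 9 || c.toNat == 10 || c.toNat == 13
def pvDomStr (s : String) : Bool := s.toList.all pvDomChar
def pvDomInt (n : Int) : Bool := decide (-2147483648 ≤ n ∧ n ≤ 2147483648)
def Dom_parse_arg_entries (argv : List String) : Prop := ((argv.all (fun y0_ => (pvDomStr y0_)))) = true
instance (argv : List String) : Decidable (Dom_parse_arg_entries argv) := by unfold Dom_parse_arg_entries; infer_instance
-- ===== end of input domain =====

-- B replaces A's nested cursor-driven while loops by two phases: collect all flag positions, then slice argv between consecutive flags (alternative decomposition, same cost).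
-- ===== PORT A =====
-- inner while: collect values until the next flag; returns (values, remaining suffix)
def pvAInner (rest : List String) : List String × List String :=
  match rest with
  | [] => ([], [])
  | t :: ts =>
    if PySem.Str.startswith t "-" then ([], t :: ts)
    else
      let r := pvAInner ts
      (t :: r.1, r.2)

theorem pvAInner_snd_length (rest : List String) : (pvAInner rest).2.length ≤ rest.length := by
  induction rest with
  | nil => simp [pvAInner]
  | cons t ts ih =>
    simp only [pvAInner]
    split
    · simp
    · simpa using Nat.le_succ_of_le ih

-- outer while over the cursor, transcribed as recursion on the remaining suffix (i only advances)
def pvAOuter (rest : List String) : List (String × List String) :=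
  match rest with
  | [] => []
  | t :: ts =>
    if ¬ PySem.Str.startswith t "-" then pvAOuter ts
    else
      let r := pvAInner ts
      (t, r.1) :: pvAOuter r.2
termination_by rest.length
decreasing_by
  all_goals (have := pvAInner_snd_length ts; simp; try omega)

def parse_arg_entries (argv : List String) : List (String × List String) :=
  pvAOuter argv.tail  -- the scan starts at i = 1

-- ===== PORT B =====
def parse_arg_entries_alt (argv : List String) : List (String × List String) :=
  let n : Int := argv.length
  let positions : List Int :=
    ((PySem.List.enumerate argv 0).filter
      (fun p => decide (1 ≤ p.1) && PySem.Str.startswith p.2 "-")).map (·.1)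
  (positions.zip (PySem.List.slice positions (some 1) none ++ [n])).map
    (fun pq => (PySem.List.pyGetD argv pq.1 "",  -- index always in range: pq.1 is a valid position
                PySem.List.slice argv (some (pq.1 + 1)) (some pq.2)))

-- ===== PRECONDITION & SPEC =====
def Spec_parse_arg_entries (argv : List String) (out : List (String × List String)) : Prop := out = parse_arg_entries_alt argv
instance (argv : List String) (out : List (String × List String)) : Decidable (Spec_parse_arg_entries argv out) := by unfold Spec_parse_arg_entries; infer_instance

-- ===== CLAIM (what is proved, stated in full; the proofs are below) =====
def Claim_equal_parse_arg_entries : Prop := ∀ (argv : List String), Dom_parse_arg_entries argv → Spec_parse_arg_entries argv (parse_arg_entries argv)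

-- ===== LEMMAS AND PROOFS =====
def pvFlag (t : String) : Bool := PySem.Str.startswith t "-"

def pvPos (L : List String) (s : Int) : List Int :=
  ((PySem.List.enumerate L s).filter (fun p => pvFlag p.2)).map (·.1)

def pvB (argv : List String) (ps : List Int) : List (String × List String) :=
  (ps.zip (ps.drop 1 ++ [(argv.length : Int)])).map
    (fun pq => (PySem.List.pyGetD argv pq.1 "", PySem.List.slice argv (some (pq.1 + 1)) (some pq.2)))

theorem pvPos_nil (s : Int) : pvPos [] s = [] := by simp [pvPos]

theorem pvPos_cons (t : String) (ts : List String) (s : Int) :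
    pvPos (t :: ts) s = if pvFlag t then s :: pvPos ts (s + 1) else pvPos ts (s + 1) := by
  simp only [pvPos, PySem.List.enumerate_cons, List.filter_cons]
  split <;> simp

theorem pvAlt_eq_pvB (argv : List String) :
    parse_arg_entries_alt argv = pvB argv (pvPos argv.tail 1) := by
  have hpos : ((PySem.List.enumerate argv 0).filter
      (fun p => decide (1 ≤ p.1) && PySem.Str.startswith p.2 "-")).map (·.1)
      = pvPos argv.tail 1 := by
    cases argv with
    | nil => simp [pvPos]
    | cons h tl =>
      simp only [PySem.List.enumerate_cons, List.filter_cons]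
      norm_num
      unfold pvPos
      congr 1
      apply List.filter_congr
      intro p hp
      rcases (PySem.List.mem_enumerate_iff _ _ _).1 hp with ⟨k, hk, rfl⟩
      have hk1 : (1:Int) ≤ 1 + (k:Int) := by omega
      simp [pvFlag, hk1]
  simp only [parse_arg_entries_alt, pvB, hpos, PySem.List.slice_from_one, List.drop_one]

theorem pvInner_eq (ts : List String) :
    pvAInner ts = (ts.takeWhile (fun t => !pvFlag t), ts.dropWhile (fun t => !pvFlag t)) := by
  induction ts with
  | nil => rfl
  | cons t ts ih =>
    by_cases h : pvFlag t
    · simp [pvAInner, pvFlag] at h ⊢; simp [h]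
    · simp [pvFlag] at h; simp [pvAInner, h, ih, pvFlag]

theorem pvPos_nonflag_append (chunk rest : List String) (s : Int)
    (h : ∀ t ∈ chunk, pvFlag t = false) :
    pvPos (chunk ++ rest) s = pvPos rest (s + chunk.length) := by
  unfold pvPos
  rw [PySem.List.enumerate_append, List.filter_append]
  have : (PySem.List.enumerate chunk s).filter (fun p => pvFlag p.2) = [] := by
    rw [List.filter_eq_nil_iff]
    intro p hp
    rcases (PySem.List.mem_enumerate_iff _ _ _).1 hp with ⟨k, hk, rfl⟩
    simp [h _ (List.getElem_mem hk)]
  rw [this]; rfl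

theorem pvB_cons (argv : List String) (s : Int) (ps : List Int) :
    pvB argv (s :: ps) =
      (PySem.List.pyGetD argv s "",
       PySem.List.slice argv (some (s + 1)) (some (ps.headD (argv.length : Int)))) :: pvB argv ps := by
  cases ps <;> rfl

theorem pvMain : ∀ (N : Nat) (L : List String), L.length ≤ N →
    ∀ (s : Nat) (argv : List String), argv.drop s = L →
    pvB argv (pvPos L (s : Int)) = pvAOuter L := by
  intro N
  induction N with
  | zero =>
    intro L hL s argv _
    have : L = [] := List.length_eq_zero_iff.mp (Nat.le_zero.mp hL)
    subst this
    simp [pvPos_nil, pvB, pvAOuter]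
  | succ N ih =>
    intro L hL s argv hdrop
    match L with
    | [] => simp [pvPos_nil, pvB, pvAOuter]
    | t :: ts =>
      have hs : s < argv.length := by
        by_contra h
        simp [List.drop_eq_nil_of_le (Nat.le_of_not_lt h)] at hdrop
      have hts : argv.drop (s + 1) = ts := by
        rw [← List.drop_drop, hdrop]
        rfl
      have hlenargv : argv.length = s + 1 + ts.length := by
        have := congrArg List.length hts
        simp at this
        omega
      have hgetval : PySem.List.pyGetD argv (s : Int) "" = t := by
        rw [PySem.List.pyGetD_natCast, List.getD_eq_getElem?_getD]
        have : argv[s]? = some t := by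
          have h0 : (argv.drop s)[0]? = some t := by rw [hdrop]; rfl
          rw [List.getElem?_drop] at h0
          simpa using h0
        rw [this]; rfl
      by_cases hf : pvFlag t
      · -- flag case
        set chunk := ts.takeWhile (fun t => !pvFlag t) with hchunk
        set rest := ts.dropWhile (fun t => !pvFlag t) with hrest
        have hsplit : ts = chunk ++ rest := (List.takeWhile_append_dropWhile).symm
        have hchunknf : ∀ x ∈ chunk, pvFlag x = false := by
          intro x hx
          have := List.mem_takeWhile_imp hx
          simpa using this
        have hchlen : chunk.length ≤ ts.length := List.Sublist.length_le (List.takeWhile_sublist _)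
        have hdroprest : argv.drop (s + 1 + chunk.length) = rest := by
          rw [← List.drop_drop, hts, hsplit, List.drop_left]
        have hposts : pvPos ts ((s:Int) + 1) = pvPos rest ((s:Int) + 1 + chunk.length) := by
          rw [hsplit]
          exact pvPos_nonflag_append chunk rest _ hchunknf
        have hslice : PySem.List.slice argv (some ((s:Int) + 1)) (some ((s:Int) + 1 + (chunk.length:Int))) = chunk := by
          have e1 : ((s:Int) + 1) = ((s + 1 : Nat) : Int) := by push_cast; ring
          rw [e1, PySem.List.slice_natCast_add, hts, hsplit, List.take_left]
        have houter : pvAOuter (t :: ts) = (t, chunk) :: pvAOuter rest := by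
          have hf2 : PySem.Chars.startswith t.toList ['-'] = true := by
            have := hf; rw [pvFlag] at this; simpa using this
          rw [pvAOuter, if_neg (by simp [hf2]), pvInner_eq]
        rw [houter, pvPos_cons, if_pos hf, hposts]
        match hrestEq : rest with
        | [] =>
          have hchunkts : chunk = ts := by rw [hsplit]; simp
          rw [pvPos_nil, pvB_cons, pvB]
          simp only [List.zip_nil_left, List.map_nil, List.headD_nil]
          have hn : (argv.length : Int) = (s:Int) + 1 + (chunk.length:Int) := by
            rw [hchunkts]; push_cast [hlenargv]; ring
          rw [hn, hslice, hgetval]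
          simp [pvAOuter]
        | r :: rs =>
          have hfr : pvFlag r = true := by
            have := List.head?_dropWhile_not (fun t => !pvFlag t) ts
            rw [← hrest] at this
            simpa using this
          rw [pvPos_cons, if_pos hfr, pvB_cons]
          simp only [List.headD_cons]
          rw [hslice, hgetval]
          congr 1
          have e2 : ((s:Int) + 1 + (chunk.length:Int)) = ((s + 1 + chunk.length : Nat) : Int) := by push_cast; ring
          rw [e2]
          have hrlen : (r :: rs).length ≤ N := by
            have h1 : ts.length ≤ N := by simpa using hL
            have h2 : (r :: rs).length ≤ ts.length := by
              rw [hsplit]; simp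
            omega
          have := ih (r :: rs) hrlen (s + 1 + chunk.length) argv (by rw [hdroprest])
          rw [pvPos_cons, if_pos hfr] at this
          exact this
      · -- non-flag case
        rw [pvPos_cons, if_neg (by simp [hf]), pvAOuter, if_pos (by rw [pvFlag] at hf; simp at hf ⊢; simp [hf])]
        have e1 : ((s:Int) + 1) = ((s + 1 : Nat) : Int) := by push_cast; ring
        rw [e1]
        exact ih ts (by simpa using hL) (s + 1) argv hts

-- ===== VERDICT (by name: the statement is the Claim_ definition above) =====
theorem parse_arg_entries_spec : Claim_equal_parse_arg_entries := by
  intro argv _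
  unfold Spec_parse_arg_entries parse_arg_entries
  rw [pvAlt_eq_pvB]
  have h1 : ((1:Nat):Int) = (1:Int) := by norm_num
  rw [← h1]
  exact (pvMain argv.tail.length argv.tail le_rfl 1 argv (by rw [List.drop_one])).symm
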